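-- pv_equiv track=rewrite | github.com/CrisRonda/devsuConcurso | 2track.py | track
-- ===== SOURCE A (Python) =====
-- def track(array_milisegundos):
--     tiempo_fin=0
--     respuesta=[]
--     dias=''
--     horas=''
--     minutos=''
--     segundos=''
--     milisegundos=''
--
--     if(array_milisegundos):
--         array_milisegundos=array_milisegundos
--     else:
--         array_milisegundos=[0]
--
--     for tiempo in array_milisegundos:
--
--         if tiempo <0 :
--             tiempo=0
--         tiempo_fin+=tiempo
--
--
--     dias=tiempo_fin//(86400000)
--
--     horas_aux=dias*24
--     horas=(tiempo_fin//(3600000))-horas_aux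
--
--     minutos_aux=(dias*24*60)+(horas*60)
--     minutos=(tiempo_fin//(60000))- minutos_aux
--
--     segundos_aux=(dias*24*60*60)+(horas*60*60)+(minutos*60)
--     segundos=(tiempo_fin//(1000))-segundos_aux
--
--     milisegundos_aux=(dias*24*60*60*1000)+(horas*60*60*1000)+(minutos*60*1000)+(segundos*1000)
--     milisegundos=tiempo_fin-milisegundos_aux
--
--     respuesta=[dias, horas, minutos, segundos, milisegundos]
--     return respuesta
-- ===== SOURCE B (Python) =====
-- def track(array_milisegundos):
--     total = sum(t for t in array_milisegundos if t > 0)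
--     unidades = []
--     for radix in (1000, 60, 60, 24):
--         total, resto = divmod(total, radix)
--         unidades.append(resto)
--     unidades.append(total)
--     unidades.reverse()
--     return unidades
-- ===== Notes on version B (the rewrite author's own statement) =====
-- stated objective: alternative
-- what changed: B sums only the positive entries via a filtered generator (no per-element clamp and no empty-list special case) and converts the total to mixed radix bottom-up: a loop over a table of radices collects remainders least-significant-first and the result list is built back-to-front by a final reverse, instead of A's recomputing each unit from the full total with subtracted offsets.
import Mathlib
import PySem

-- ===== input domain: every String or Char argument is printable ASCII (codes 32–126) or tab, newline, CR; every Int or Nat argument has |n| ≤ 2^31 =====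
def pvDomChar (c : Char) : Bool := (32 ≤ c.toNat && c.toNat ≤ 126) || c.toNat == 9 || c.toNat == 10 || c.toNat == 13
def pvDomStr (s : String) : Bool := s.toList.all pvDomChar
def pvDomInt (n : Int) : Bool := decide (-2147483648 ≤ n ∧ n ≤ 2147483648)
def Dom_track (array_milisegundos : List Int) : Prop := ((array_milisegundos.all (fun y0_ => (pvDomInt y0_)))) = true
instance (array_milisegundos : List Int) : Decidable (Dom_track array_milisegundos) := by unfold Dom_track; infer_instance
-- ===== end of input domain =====

-- B sums only the positive entries and converts the total to mixed radix bottom-up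
-- (remainder loop over radices 1000,60,60,24, result built back-to-front), instead of
-- A's clamped sum and per-unit floor divisions with recomputed offsets (objective: alternative).

-- ===== PORT A =====
def track (array_milisegundos : List Int) : List Int :=
  let arr := if array_milisegundos.isEmpty then [0] else array_milisegundos
  let tiempo_fin := arr.foldl (fun acc tiempo => acc + (if tiempo < 0 then 0 else tiempo)) 0
  let dias := PySem.Int.floordiv tiempo_fin 86400000
  let horas_aux := dias * 24
  let horas := PySem.Int.floordiv tiempo_fin 3600000 - horas_aux
  let minutos_aux := dias * 24 * 60 + horas * 60
  let minutos := PySem.Int.floordiv tiempo_fin 60000 - minutos_aux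
  let segundos_aux := dias * 24 * 60 * 60 + horas * 60 * 60 + minutos * 60
  let segundos := PySem.Int.floordiv tiempo_fin 1000 - segundos_aux
  let milisegundos_aux := dias * 24 * 60 * 60 * 1000 + horas * 60 * 60 * 1000 + minutos * 60 * 1000 + segundos * 1000
  let milisegundos := tiempo_fin - milisegundos_aux
  [dias, horas, minutos, segundos, milisegundos]

-- ===== PORT B =====
def track_alt (array_milisegundos : List Int) : List Int :=
  let total := (array_milisegundos.filter (fun t => 0 < t)).sum
  let st := [(1000:Int), 60, 60, 24].foldl
    (fun (st : Int × List Int) radix =>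
      (PySem.Int.floordiv st.1 radix, st.2 ++ [PySem.Int.mod st.1 radix]))
    (total, [])
  (st.2 ++ [st.1]).reverse

-- ===== PRECONDITION & SPEC =====
def Spec_track (array_milisegundos : List Int) (out : List Int) : Prop := out = track_alt array_milisegundos
instance (array_milisegundos : List Int) (out : List Int) : Decidable (Spec_track array_milisegundos out) := by unfold Spec_track; infer_instance

-- ===== CLAIM (what is proved, stated in full; the proofs are below) =====
def Claim_equal_track : Prop := ∀ (array_milisegundos : List Int), Dom_track array_milisegundos → Spec_track array_milisegundos (track array_milisegundos)

-- ===== LEMMAS AND PROOFS =====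

-- A's clamped running sum equals B's sum of the positive entries.
theorem track_sum_eq (xs : List Int) (acc : Int) :
    xs.foldl (fun acc tiempo => acc + (if tiempo < 0 then 0 else tiempo)) acc
      = acc + (xs.filter (fun t => 0 < t)).sum := by
  induction xs generalizing acc with
  | nil => simp
  | cons x xs ih =>
    simp only [List.foldl_cons, List.filter_cons, ih]
    by_cases hx : 0 < x
    · simp [hx, not_lt.mpr (le_of_lt hx)]; ring
    · have : x ≤ 0 := not_lt.mp hx
      rcases lt_or_eq_of_le this with h | h
      · simp [hx, h]
      · simp [← h]

theorem track_spec_aux : ∀ (xs : List Int), Spec_track xs (track xs) := by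
  intro xs
  unfold Spec_track track track_alt
  simp only [List.foldl]
  have hsum : (if xs.isEmpty then [(0:Int)] else xs).foldl
      (fun acc tiempo => acc + (if tiempo < 0 then 0 else tiempo)) 0
        = (xs.filter (fun t => 0 < t)).sum := by
    by_cases h : xs.isEmpty
    · rw [List.isEmpty_iff.mp h]; simp
    · simp only [h, if_false]
      simpa using track_sum_eq xs 0
  rw [hsum]
  set t := (xs.filter (fun t => 0 < t)).sum with ht
  have htpos : 0 ≤ t := by
    apply List.sum_nonneg
    intro x hx
    exact le_of_lt (by simpa using (List.mem_filter.mp hx).2)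
  have h1 : ∀ (a : Int) (b : Int), 0 < b → PySem.Int.floordiv a b = a / b :=
    fun a b hb => PySem.Int.floordiv_eq_ediv_of_pos hb
  have h2 : ∀ (a : Int) (b : Int), 0 < b → PySem.Int.mod a b = a % b :=
    fun a b hb => PySem.Int.mod_eq_emod_of_pos hb
  simp only [h1 _ _ (by norm_num : (0:Int) < 86400000), h1 _ _ (by norm_num : (0:Int) < 3600000),
    h1 _ _ (by norm_num : (0:Int) < 60000), h1 _ _ (by norm_num : (0:Int) < 1000),
    h1 _ _ (by norm_num : (0:Int) < 60), h1 _ _ (by norm_num : (0:Int) < 24),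
    h2 _ _ (by norm_num : (0:Int) < 1000), h2 _ _ (by norm_num : (0:Int) < 60),
    h2 _ _ (by norm_num : (0:Int) < 24),
    List.reverse_cons, List.reverse_nil, List.nil_append,
    List.cons_append, List.cons.injEq, and_true]
  and_intros <;> omega

-- ===== VERDICT (by name: the statement is the Claim_ definition above) =====
theorem track_spec : Claim_equal_track := fun xs _ => track_spec_aux xs
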